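-- pv_equiv track=rewrite | github.com/Pekaviro/AOIS | LR_4/logical_function.py | _glue_terms
-- ===== SOURCE A (Python) =====
-- def _glue_terms(term1, term2):
--     diff = 0
--     glued = []
--     for v1, v2 in zip(term1, term2):
--         if v1 == v2:
--             glued.append(v1)
--         elif v1 is None or v2 is None:
--             return None
--         else:
--             diff += 1
--             glued.append(None)
--
--     return tuple(glued) if diff == 1 else None
-- ===== SOURCE B (Python) =====
-- def _glue_terms(term1, term2):
--     pairs = list(zip(term1, term2))
--     diffs = [(a, b) for a, b in pairs if a != b]
--     if len(diffs) != 1: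
--         return None
--     a, b = diffs[0]
--     if a is None or b is None:
--         return None
--     return tuple(x if x == y else None for x, y in pairs)
-- ===== Notes on version B (the rewrite author's own statement) =====
-- stated objective: alternative
-- what changed: Replaces A's single interleaved loop (accumulating the glued list, counting diffs and early-returning on a None diff) by a table-then-construct shape: filter out all differing pairs first, decide from that table alone, then build the result in a separate map pass.
import Mathlib
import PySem

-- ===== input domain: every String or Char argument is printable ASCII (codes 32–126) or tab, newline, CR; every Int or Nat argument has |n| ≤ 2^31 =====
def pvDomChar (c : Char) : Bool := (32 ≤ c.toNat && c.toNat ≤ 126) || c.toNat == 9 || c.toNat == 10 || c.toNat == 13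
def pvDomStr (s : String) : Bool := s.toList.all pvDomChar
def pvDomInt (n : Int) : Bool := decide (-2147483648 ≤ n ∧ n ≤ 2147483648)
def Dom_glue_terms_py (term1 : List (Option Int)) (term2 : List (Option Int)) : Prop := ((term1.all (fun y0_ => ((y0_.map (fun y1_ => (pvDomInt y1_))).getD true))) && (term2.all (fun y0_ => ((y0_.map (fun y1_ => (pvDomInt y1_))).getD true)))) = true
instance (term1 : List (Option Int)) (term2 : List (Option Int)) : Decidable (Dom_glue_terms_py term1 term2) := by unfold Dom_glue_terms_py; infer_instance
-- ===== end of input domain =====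

-- B replaces A's interleaved accumulate-count-and-early-return loop by a filter-the-diffs
-- table followed by a separate construction pass (alternative decomposition, same cost).

-- ===== PORT A =====
-- the `for v1, v2 in zip(...)` loop; `none` = the early `return None`
def glueLoopA : List (Option Int × Option Int) → Int → List (Option Int) →
    Option (Int × List (Option Int))
  | [], diff, glued => some (diff, glued)
  | (v1, v2) :: rest, diff, glued =>
    if v1 = v2 then glueLoopA rest diff (glued ++ [v1])
    else if v1 = none ∨ v2 = none then none
    else glueLoopA rest (diff + 1) (glued ++ [none])

def glue_terms_py (term1 : List (Option Int)) (term2 : List (Option Int)) :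
    Option (List (Option Int)) :=
  match glueLoopA (term1.zip term2) 0 [] with
  | none => none
  | some (diff, glued) => if diff = 1 then some glued else none

-- ===== PORT B =====
def glue_terms_py_alt (term1 : List (Option Int)) (term2 : List (Option Int)) :
    Option (List (Option Int)) :=
  let pairs := term1.zip term2
  let diffs := pairs.filter (fun p => p.1 ≠ p.2)
  match diffs with
  | [(a, b)] =>
    if a = none ∨ b = none then none
    else some (pairs.map (fun p => if p.1 = p.2 then p.1 else none))
  | _ => none

-- ===== PRECONDITION & SPEC =====
def Spec_glue_terms_py (term1 : List (Option Int)) (term2 : List (Option Int)) (out : Option (List (Option Int))) : Prop := out = glue_terms_py_alt term1 term2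
instance (term1 : List (Option Int)) (term2 : List (Option Int)) (out : Option (List (Option Int))) : Decidable (Spec_glue_terms_py term1 term2 out) := by unfold Spec_glue_terms_py; infer_instance

-- ===== CLAIM (what is proved, stated in full; the proofs are below) =====
def Claim_equal_glue_terms_py : Prop := ∀ (term1 : List (Option Int)) (term2 : List (Option Int)), Dom_glue_terms_py term1 term2 → Spec_glue_terms_py term1 term2 (glue_terms_py term1 term2)

-- ===== LEMMAS AND PROOFS =====

-- "no differing pair involves None": where A would early-return None
abbrev gluClean (L : List (Option Int × Option Int)) : Prop :=
  ∀ p ∈ L, p.1 ≠ p.2 → p.1 ≠ none ∧ p.2 ≠ none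

-- characterisation of A's loop
lemma glueLoopA_eq (L : List (Option Int × Option Int)) (d : Int) (g : List (Option Int)) :
    glueLoopA L d g =
      if gluClean L then
        some (d + (L.filter (fun p => p.1 ≠ p.2)).length,
              g ++ L.map (fun p => if p.1 = p.2 then p.1 else none))
      else none := by
  induction L generalizing d g with
  | nil => simp [glueLoopA, gluClean]
  | cons p rest ih =>
    obtain ⟨v1, v2⟩ := p
    by_cases h : v1 = v2
    · subst h
      have hcons : gluClean ((v1, v1) :: rest) ↔ gluClean rest := by
        constructor
        · intro hcl q hq hne; exact hcl q (List.mem_cons_of_mem _ hq) hne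
        · intro hcl q hq hne
          rcases List.mem_cons.mp hq with rfl | hq
          · exact absurd rfl hne
          · exact hcl q hq hne
      rw [glueLoopA, if_pos rfl, ih]
      by_cases hc : gluClean rest
      · rw [if_pos hc, if_pos (hcons.mpr hc)]
        simp
      · rw [if_neg hc, if_neg (fun hcl => hc (hcons.mp hcl))]
    · by_cases hn : v1 = none ∨ v2 = none
      · have hnc : ¬ gluClean ((v1, v2) :: rest) := by
          intro hcl
          rcases hcl (v1, v2) List.mem_cons_self h with ⟨h1, h2⟩
          rcases hn with hn | hn
          · exact h1 hn
          · exact h2 hn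
        rw [glueLoopA, if_neg h, if_pos hn, if_neg hnc]
      · have hcons : gluClean ((v1, v2) :: rest) ↔ gluClean rest := by
          constructor
          · intro hcl q hq hne; exact hcl q (List.mem_cons_of_mem _ hq) hne
          · intro hcl q hq hne
            rcases List.mem_cons.mp hq with rfl | hq
            · push Not at hn; exact hn
            · exact hcl q hq hne
        rw [glueLoopA, if_neg h, if_neg hn, ih]
        by_cases hc : gluClean rest
        · rw [if_pos hc, if_pos (hcons.mpr hc)]
          simp [h]
          ring
        · rw [if_neg hc, if_neg (fun hcl => hc (hcons.mp hcl))]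

-- ===== VERDICT (by name: the statement is the Claim_ definition above) =====
theorem glue_terms_py_spec : Claim_equal_glue_terms_py := by
  intro term1 term2 _
  unfold Spec_glue_terms_py glue_terms_py glue_terms_py_alt
  rw [glueLoopA_eq]
  set L := term1.zip term2 with hL
  rcases hd : L.filter (fun p => decide ¬(p.1 = p.2)) with _ | ⟨⟨a, b⟩, rest⟩
  · -- no differing pair: both sides return none (A via diff = 0 ≠ 1)
    have hc : gluClean L := by
      intro p hp hne
      have : p ∈ L.filter (fun p => decide ¬(p.1 = p.2)) := by
        simp [List.mem_filter, hp, hne]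
      rw [hd] at this; simp at this
    rw [if_pos hc]
    simp only [ne_eq, hd]
    simp
  · rcases rest with _ | ⟨q, rest2⟩
    · -- exactly one differing pair (a, b)
      have hmem : (a, b) ∈ L ∧ a ≠ b := by
        have : (a, b) ∈ L.filter (fun p => decide ¬(p.1 = p.2)) := by
          rw [hd]; exact List.mem_cons_self
        simpa [List.mem_filter] using this
      by_cases hn : a = none ∨ b = none
      · -- A early-returns None; B's None-guard fires
        have hnc : ¬ gluClean L := by
          intro hcl
          rcases hcl (a, b) hmem.1 hmem.2 with ⟨h1, h2⟩
          rcases hn with hn | hn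
          · exact h1 hn
          · exact h2 hn
        rw [if_neg hnc]
        simp only [ne_eq, hd]
        simp [hn]
      · have hc : gluClean L := by
          intro p hp hne
          have hpf : p ∈ L.filter (fun p => decide ¬(p.1 = p.2)) := by
            simp [List.mem_filter, hp, hne]
          rw [hd] at hpf
          simp only [List.mem_singleton] at hpf
          subst hpf
          push Not at hn; exact hn
        rw [if_pos hc]
        simp only [ne_eq, hd]
        simp [hn]
    · -- two or more differing pairs: neither side yields a result
      by_cases hc : gluClean L
      · rw [if_pos hc]
        simp only [ne_eq, hd]
        simp
        omega
      · rw [if_neg hc]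
        simp only [ne_eq, hd]
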